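-- pv_equiv track=rewrite | github.com/st3v3nmw/game-bots | app/lib.py | getPartWords
-- ===== SOURCE A (Python) =====
-- def getPartWords(seq, k, neighbours, horizontal = True):
--     words_pt = []
--     for i in range(len(seq)):
--         for j in range(i + 1, len(seq)):
--             word = ''.join(seq[i:j])
--             bingo = word.count('_') == 7
--             if word.count('_') != 0 and word.count('_') != len(word):
--                 if horizontal:
--                     words_pt.append((word, (k, i), horizontal, False, bingo))
--                 else:
--                     words_pt.append((word, (i, k), horizontal, False, bingo))
--             elif word.count('_') == len(word):
--                 try:
--                     if seq[j] != '_' or seq[i-1] != '_': continue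
--                 except IndexError:
--                     continue
--                 if horizontal:
--                     for neighbour in neighbours:
--                         w = ''.join(neighbour[i:j])
--                         if w.count('_') != 0 and w.count('_') != len(w):
--                             words_pt.append((word, (k, i), horizontal, True, bingo))
--                             break
--                 else:
--                     for neighbour in neighbours:
--                         w = ''.join(neighbour[i:j])
--                         if w.count('_') != 0 and w.count('_') != len(w):
--                             words_pt.append((word, (i, k), horizontal, True, bingo))
--                             break
--     return words_pt
-- ===== SOURCE B (Python) =====
-- def getPartWords(seq, k, neighbours, horizontal=True):
--     # Prefix sums of underscore counts / lengths; join a substring only when it is appended.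
--     def prefix(xs, f):
--         p = [0]
--         for s in xs:
--             p.append(p[-1] + f(s))
--         return p
--
--     n = len(seq)
--     cnt = prefix(seq, lambda s: s.count('_'))
--     ln = prefix(seq, len)
--     nprefs = [(prefix(nb, lambda s: s.count('_')), prefix(nb, len), len(nb))
--               for nb in neighbours]
--     words_pt = []
--     for i in range(n):
--         for j in range(i + 1, n):
--             u = cnt[j] - cnt[i]
--             L = ln[j] - ln[i]
--             if 0 < u < L:
--                 pos = (k, i) if horizontal else (i, k)
--                 words_pt.append((''.join(seq[i:j]), pos, horizontal, False, u == 7))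
--             elif u == L:
--                 if seq[j] != '_' or seq[i - 1] != '_':
--                     continue
--                 if any(0 < c[min(j, m)] - c[min(i, m)] < l[min(j, m)] - l[min(i, m)]
--                        for c, l, m in nprefs):
--                     pos = (k, i) if horizontal else (i, k)
--                     words_pt.append((''.join(seq[i:j]), pos, horizontal, True, u == 7))
--     return words_pt
-- ===== Notes on version B (the rewrite author's own statement) =====
-- stated objective: faster
-- what changed: B precomputes prefix sums of the underscore counts and lengths of seq and of every neighbour row, so each (i,j) pair is classified in O(1) without joining the substring (the join happens only for appended results), and the neighbour break-loop becomes an any() over the precomputed prefix tables.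
import Mathlib
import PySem

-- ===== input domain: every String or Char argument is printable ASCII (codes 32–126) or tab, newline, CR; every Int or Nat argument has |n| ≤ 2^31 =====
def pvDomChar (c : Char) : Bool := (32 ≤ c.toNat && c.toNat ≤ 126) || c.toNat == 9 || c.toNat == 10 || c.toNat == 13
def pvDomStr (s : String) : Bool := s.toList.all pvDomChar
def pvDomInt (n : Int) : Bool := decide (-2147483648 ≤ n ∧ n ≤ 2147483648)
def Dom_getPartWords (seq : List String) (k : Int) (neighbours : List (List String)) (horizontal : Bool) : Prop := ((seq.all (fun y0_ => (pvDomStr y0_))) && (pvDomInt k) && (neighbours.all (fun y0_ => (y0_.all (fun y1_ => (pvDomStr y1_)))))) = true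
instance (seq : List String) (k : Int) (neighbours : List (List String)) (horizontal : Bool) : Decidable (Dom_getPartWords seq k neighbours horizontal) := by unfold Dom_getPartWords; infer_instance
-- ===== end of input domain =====

-- B replaces A's per-substring join+count (O(n^3)) by prefix sums of underscore counts and
-- lengths, joining a substring only when it is actually appended; same return value.

-- ===== PORT A =====
-- the 'for neighbour in neighbours: … break' loop of A (append entry on the first mixed neighbour slice)
def nbScanA (nbs : List (List String)) (i j : Int)
    (entry : String × (Int × Int) × Bool × Bool × Bool)
    (acc : List (String × (Int × Int) × Bool × Bool × Bool)) :
    List (String × (Int × Int) × Bool × Bool × Bool) :=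
  match nbs with
  | [] => acc
  | nb :: rest =>
    let w := PySem.Str.join "" (PySem.List.slice nb (some i) (some j))
    if (PySem.Str.count w "_" : Int) ≠ 0 ∧ (PySem.Str.count w "_" : Int) ≠ PySem.Str.len w then
      acc ++ [entry]
    else nbScanA rest i j entry acc

def getPartWords (seq : List String) (k : Int) (neighbours : List (List String)) (horizontal : Bool) : List (String × (Int × Int) × Bool × Bool × Bool) :=
  (PySem.List.pyRange 0 (seq.length : Int)).foldl (fun acc i =>
    (PySem.List.pyRange (i + 1) (seq.length : Int)).foldl (fun acc j =>
      let word := PySem.Str.join "" (PySem.List.slice seq (some i) (some j))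
      let bingo : Bool := PySem.Str.count word "_" == 7
      if (PySem.Str.count word "_" : Int) ≠ 0 ∧ (PySem.Str.count word "_" : Int) ≠ PySem.Str.len word then
        if horizontal then acc ++ [(word, (k, i), horizontal, false, bingo)]
        else acc ++ [(word, (i, k), horizontal, false, bingo)]
      else if (PySem.Str.count word "_" : Int) = PySem.Str.len word then
        -- try/except around seq[j], seq[i-1]: pyGet? none = IndexError = continue;
        -- 'or' short-circuits, so seq[i-1] is only read when seq[j] == '_'
        match PySem.List.pyGet? seq j with
        | none => acc
        | some sj =>
          if sj ≠ "_" then acc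
          else
            match PySem.List.pyGet? seq (i - 1) with
            | none => acc
            | some sp =>
              if sp ≠ "_" then acc
              else if horizontal then nbScanA neighbours i j (word, (k, i), horizontal, true, bingo) acc
              else nbScanA neighbours i j (word, (i, k), horizontal, true, bingo) acc
      else acc) acc) []

-- ===== PORT B =====
-- p = [0]; for s in xs: p.append(p[-1] + f(s))   (the running-total list, built front to back)
def pvPrefixGo (a : Int) (f : String → Int) : List String → List Int
  | [] => [a]
  | s :: rest => a :: pvPrefixGo (a + f s) f rest

def pvPrefix (xs : List String) (f : String → Int) : List Int := pvPrefixGo 0 f xs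

def pvCountU (s : String) : Int := (PySem.Str.count s "_" : Int)

def getPartWords_alt (seq : List String) (k : Int) (neighbours : List (List String)) (horizontal : Bool) : List (String × (Int × Int) × Bool × Bool × Bool) :=
  let n := seq.length
  let cnt := pvPrefix seq pvCountU
  let ln := pvPrefix seq PySem.Str.len
  let nprefs := neighbours.map (fun nb => (pvPrefix nb pvCountU, pvPrefix nb PySem.Str.len, (nb.length : Int)))
  (PySem.List.pyRange 0 (n : Int)).foldl (fun acc i =>
    (PySem.List.pyRange (i + 1) (n : Int)).foldl (fun acc j =>
      let u := PySem.List.pyGetD cnt j 0 - PySem.List.pyGetD cnt i 0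
      let L := PySem.List.pyGetD ln j 0 - PySem.List.pyGetD ln i 0
      if 0 < u ∧ u < L then
        let pos := if horizontal then (k, i) else (i, k)
        acc ++ [(PySem.Str.join "" (PySem.List.slice seq (some i) (some j)), pos, horizontal, false, u == 7)]
      else if u = L then
        if PySem.List.pyGetD seq j "" ≠ "_" ∨ PySem.List.pyGetD seq (i - 1) "" ≠ "_" then acc
        else if nprefs.any (fun t =>
            decide (0 < PySem.List.pyGetD t.1 (min j t.2.2) 0 - PySem.List.pyGetD t.1 (min i t.2.2) 0 ∧
              PySem.List.pyGetD t.1 (min j t.2.2) 0 - PySem.List.pyGetD t.1 (min i t.2.2) 0 <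
              PySem.List.pyGetD t.2.1 (min j t.2.2) 0 - PySem.List.pyGetD t.2.1 (min i t.2.2) 0)) then
          let pos := if horizontal then (k, i) else (i, k)
          acc ++ [(PySem.Str.join "" (PySem.List.slice seq (some i) (some j)), pos, horizontal, true, u == 7)]
        else acc
      else acc) acc) []

-- ===== PRECONDITION & SPEC =====
def Spec_getPartWords (seq : List String) (k : Int) (neighbours : List (List String)) (horizontal : Bool) (out : List (String × (Int × Int) × Bool × Bool × Bool)) : Prop := out = getPartWords_alt seq k neighbours horizontal
instance (seq : List String) (k : Int) (neighbours : List (List String)) (horizontal : Bool) (out : List (String × (Int × Int) × Bool × Bool × Bool)) : Decidable (Spec_getPartWords seq k neighbours horizontal out) := by unfold Spec_getPartWords; infer_instance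

-- ===== CLAIM (what is proved, stated in full; the proofs are below) =====
def Claim_equal_getPartWords : Prop := ∀ (seq : List String) (k : Int) (neighbours : List (List String)) (horizontal : Bool), Dom_getPartWords seq k neighbours horizontal → Spec_getPartWords seq k neighbours horizontal (getPartWords seq k neighbours horizontal)

-- ===== LEMMAS AND PROOFS =====

-- Python's str.count with a single-character needle counts occurrences of that character
theorem pvGoCount (c : Char) (l : List Char) (fuel acc : Nat) (h : l.length ≤ fuel) :
    PySem.Chars.count.go [c] fuel l acc = acc + l.count c := by
  induction l generalizing fuel acc with
  | nil => cases fuel <;> simp [PySem.Chars.count.go]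
  | cons hd t ih =>
    cases fuel with
    | zero => simp at h
    | succ f =>
      rw [PySem.Chars.count.go]
      simp only [List.length_cons, Nat.succ_le_succ_iff] at h
      by_cases hc : c = hd
      · have hp : [c].isPrefixOf (hd :: t) = true := by simp [List.isPrefixOf, hc]
        rw [if_pos hp]
        simp only [List.length_singleton, List.drop_succ_cons, List.drop_zero]
        rw [ih f (acc + 1) h, List.count_cons]
        simp [hc]
        omega
      · have hp : [c].isPrefixOf (hd :: t) = false := by simp [List.isPrefixOf, hc]
        rw [if_neg (by simp [hp]), ih f acc h, List.count_cons]
        simp [Ne.symm hc]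

theorem pvCountChar (l : List Char) (c : Char) : PySem.Chars.count l [c] = l.count c := by
  simp [PySem.Chars.count, pvGoCount c l l.length 0 le_rfl]

-- ''.join on the character level is flatten
theorem pvJoinFlatten (ps : List (List Char)) : PySem.Chars.join [] ps = ps.flatten := by
  induction ps with
  | nil => simp [PySem.Chars.join_nil]
  | cons x r ih =>
    cases r with
    | nil => simp [PySem.Chars.join_singleton]
    | cons y s => rw [PySem.Chars.join_cons_cons]; simp_all

-- count / len of a join of strings, as sums over the parts
theorem pvToListU : ("_" : String).toList = ['_'] := by decide

theorem pvCountStr (s : String) : PySem.Str.count s "_" = s.toList.count '_' := by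
  rw [PySem.Str.count_eq, pvToListU, pvCountChar]

theorem pvCountJoin (ws : List String) :
    ((PySem.Str.count (PySem.Str.join "" ws) "_" : Nat) : Int) = (ws.map pvCountU).sum := by
  have h1 : PySem.Str.count (PySem.Str.join "" ws) "_"
      = ((ws.map String.toList).map (List.count '_')).sum := by
    rw [pvCountStr, PySem.Str.toList_join]
    have : ("" : String).toList = [] := by decide
    rw [this, pvJoinFlatten, List.count_flatten]
  rw [h1, Nat.cast_list_sum, List.map_map, List.map_map]
  exact congrArg List.sum (List.map_congr_left (fun s _ => by simp [pvCountU, pvCountChar]))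

theorem pvLenJoin (ws : List String) :
    PySem.Str.len (PySem.Str.join "" ws) = (ws.map PySem.Str.len).sum := by
  rw [PySem.Str.len_eq, PySem.Str.toList_join]
  have : ("" : String).toList = [] := by decide
  rw [this, pvJoinFlatten, List.length_flatten, Nat.cast_list_sum, List.map_map, List.map_map]
  exact congrArg List.sum (List.map_congr_left (fun s _ => by simp [PySem.Str.len_eq]))

theorem pvCountLeLen (s : String) : (PySem.Str.count s "_" : Int) ≤ PySem.Str.len s := by
  rw [pvCountStr, PySem.Str.len_eq]
  exact_mod_cast List.count_le_length

-- prefix list lookups are sums over a take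
theorem pvPrefixGoGetD (a : Int) (f : String → Int) (xs : List String) (t : Nat) (h : t ≤ xs.length) :
    PySem.List.pyGetD (pvPrefixGo a f xs) (t : Int) 0 = a + ((xs.take t).map f).sum := by
  induction xs generalizing a t with
  | nil =>
    simp only [List.length_nil, Nat.le_zero] at h
    subst h
    simp [pvPrefixGo]
  | cons s r ih =>
    cases t with
    | zero => simp [pvPrefixGo]
    | succ t' =>
      have : ((t' + 1 : Nat) : Int) = ((t' : Nat) : Int) + 1 := by push_cast; ring
      simp only [pvPrefixGo, List.take_succ_cons, List.map_cons, List.sum_cons]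
      rw [PySem.List.pyGetD_natCast]
      simp only [List.getD_cons_succ]
      rw [← PySem.List.pyGetD_natCast, ih (a + f s) t' (by simpa using h)]
      ring

theorem pvPrefixGetD (f : String → Int) (xs : List String) (t : Nat) (h : t ≤ xs.length) :
    PySem.List.pyGetD (pvPrefix xs f) (t : Int) 0 = ((xs.take t).map f).sum := by
  simpa using pvPrefixGoGetD 0 f xs t h

-- the prefix difference is a sum over the slice
theorem pvPrefixDelta (f : String → Int) (xs : List String) (a b : Nat) (hab : a ≤ b) (hb : b ≤ xs.length) :
    PySem.List.pyGetD (pvPrefix xs f) (b : Int) 0 - PySem.List.pyGetD (pvPrefix xs f) (a : Int) 0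
      = ((PySem.List.slice xs (some (a : Int)) (some (b : Int))).map f).sum := by
  rw [pvPrefixGetD f xs b hb, pvPrefixGetD f xs a (le_trans hab hb), PySem.List.slice_natCast]
  conv_lhs => rw [show b = a + (b - a) by omega, List.take_add]
  rw [List.map_append, List.sum_append]
  ring

-- neighbour version with clamped indices (nb may be shorter or longer than seq)
theorem pvPrefixDeltaClamp (f : String → Int) (nb : List String) (a b : Nat) (hab : a ≤ b) :
    PySem.List.pyGetD (pvPrefix nb f) (min (b : Int) (nb.length : Int)) 0
      - PySem.List.pyGetD (pvPrefix nb f) (min (a : Int) (nb.length : Int)) 0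
      = ((PySem.List.slice nb (some (a : Int)) (some (b : Int))).map f).sum := by
  rw [show min (b : Int) (nb.length : Int) = ((min b nb.length : Nat) : Int) by push_cast; rfl,
    show min (a : Int) (nb.length : Int) = ((min a nb.length : Nat) : Int) by push_cast; rfl,
    pvPrefixGetD f nb _ (min_le_right _ _), pvPrefixGetD f nb _ (min_le_right _ _),
    ← List.take_eq_take_min, ← List.take_eq_take_min, PySem.List.slice_natCast]
  conv_lhs => rw [show b = a + (b - a) by omega, List.take_add]
  rw [List.map_append, List.sum_append]
  ring

-- the break-loop over neighbours is an 'any' test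
theorem pvNbScan (nbs : List (List String)) (i j : Int) (entry acc) :
    nbScanA nbs i j entry acc =
      if nbs.any (fun nb =>
          decide ((PySem.Str.count (PySem.Str.join "" (PySem.List.slice nb (some i) (some j))) "_" : Int) ≠ 0 ∧
            (PySem.Str.count (PySem.Str.join "" (PySem.List.slice nb (some i) (some j))) "_" : Int) ≠
              PySem.Str.len (PySem.Str.join "" (PySem.List.slice nb (some i) (some j))))) then
        acc ++ [entry]
      else acc := by
  induction nbs with
  | nil => simp [nbScanA]
  | cons nb rest ih =>
    have hstep : nbScanA (nb :: rest) i j entry acc =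
        if (PySem.Str.count (PySem.Str.join "" (PySem.List.slice nb (some i) (some j))) "_" : Int) ≠ 0 ∧
            (PySem.Str.count (PySem.Str.join "" (PySem.List.slice nb (some i) (some j))) "_" : Int) ≠
              PySem.Str.len (PySem.Str.join "" (PySem.List.slice nb (some i) (some j))) then
          acc ++ [entry]
        else nbScanA rest i j entry acc := rfl
    rw [hstep]
    by_cases hm : (PySem.Str.count (PySem.Str.join "" (PySem.List.slice nb (some i) (some j))) "_" : Int) ≠ 0 ∧
        (PySem.Str.count (PySem.Str.join "" (PySem.List.slice nb (some i) (some j))) "_" : Int) ≠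
          PySem.Str.len (PySem.Str.join "" (PySem.List.slice nb (some i) (some j)))
    · rw [if_pos hm, if_pos]
      simp only [List.any_cons, Bool.or_eq_true]
      exact Or.inl (decide_eq_true hm)
    · rw [if_neg hm, ih]
      by_cases hr : rest.any (fun nb =>
          decide ((PySem.Str.count (PySem.Str.join "" (PySem.List.slice nb (some i) (some j))) "_" : Int) ≠ 0 ∧
            (PySem.Str.count (PySem.Str.join "" (PySem.List.slice nb (some i) (some j))) "_" : Int) ≠
              PySem.Str.len (PySem.Str.join "" (PySem.List.slice nb (some i) (some j))))) = true
      · rw [if_pos hr, if_pos]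
        simp only [List.any_cons, Bool.or_eq_true]
        exact Or.inr hr
      · rw [if_neg hr, if_neg]
        simp only [List.any_cons, Bool.or_eq_true]
        rintro (h1 | h2)
        · exact hm (of_decide_eq_true h1)
        · exact hr h2

theorem pvMain (seq : List String) (k : Int) (neighbours : List (List String)) (horizontal : Bool) :
    getPartWords seq k neighbours horizontal = getPartWords_alt seq k neighbours horizontal := by
  simp only [getPartWords, getPartWords_alt]
  refine PySem.List.foldl_congr_mem' _ _ _ _ ?_
  intro i hi acc
  obtain ⟨hi0, hin⟩ := PySem.List.mem_pyRange_one.mp hi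
  refine PySem.List.foldl_congr_mem' _ _ _ _ ?_
  intro j hj acc'
  obtain ⟨hj1, hjn⟩ := PySem.List.mem_pyRange_one.mp hj
  lift i to ℕ using hi0 with ni
  lift j to ℕ using (by omega) with nj
  have hij : ni < nj := by omega
  have hjn' : nj < seq.length := by exact_mod_cast hjn
  have hu := pvPrefixDelta pvCountU seq ni nj (le_of_lt hij) (le_of_lt hjn')
  rw [← pvCountJoin] at hu
  have hL := pvPrefixDelta PySem.Str.len seq ni nj (le_of_lt hij) (le_of_lt hjn')
  rw [← pvLenJoin] at hL
  rw [hu, hL]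
  set word := PySem.Str.join "" (PySem.List.slice seq (some (ni : Int)) (some (nj : Int))) with hword
  set c := PySem.Str.count word "_" with hc
  set L := PySem.Str.len word with hLw
  have hcL : (c : Int) ≤ L := pvCountLeLen word
  have hc0 : (0 : Int) ≤ (c : Int) := Int.natCast_nonneg _
  have hbingo : (((c : Int)) == (7 : Int)) = (c == 7) := by simp; omega
  rw [hbingo]
  by_cases h1 : (c : Int) ≠ 0 ∧ (c : Int) ≠ L
  · obtain ⟨h1a, h1b⟩ := h1
    rw [if_pos ⟨h1a, h1b⟩, if_pos (⟨by omega, by omega⟩ : (0 : Int) < (c : Int) ∧ (c : Int) < L)]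
    cases horizontal <;> simp
  · rw [if_neg h1, if_neg (show ¬(0 < (c : Int) ∧ (c : Int) < L) from
      fun h => h1 ⟨ne_of_gt h.1, ne_of_lt h.2⟩)]
    by_cases h2 : ((c : Int)) = L
    · rw [if_pos h2, if_pos h2]
      obtain ⟨vj, hvj⟩ : ∃ v, PySem.List.pyGet? seq ((nj : Nat) : Int) = some v := by
        rw [PySem.List.pyGet?_natCast]
        exact ⟨_, List.getElem?_eq_getElem hjn'⟩
      obtain ⟨vp, hvp⟩ : ∃ v, PySem.List.pyGet? seq (((ni : Nat) : Int) - 1) = some v := by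
        rcases Nat.eq_zero_or_pos ni with h0 | h0
        · subst h0
          have hne : seq ≠ [] := by
            intro h
            rw [h] at hjn'
            simp at hjn'
          have : ((0 : Nat) : Int) - 1 = -1 := by omega
          rw [this, PySem.List.pyGet?_neg_one]
          exact Option.isSome_iff_exists.mp (by simpa [List.getLast?_isSome] using hne)
        · have he : (((ni : Nat) : Int) - 1) = (((ni - 1 : Nat) : Nat) : Int) := by omega
          rw [he, PySem.List.pyGet?_natCast]
          exact ⟨_, List.getElem?_eq_getElem (by omega)⟩
      have hdj : PySem.List.pyGetD seq ((nj : Nat) : Int) "" = vj := by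
        simp [PySem.List.pyGetD, hvj]
      have hdp : PySem.List.pyGetD seq (((ni : Nat) : Int) - 1) "" = vp := by
        simp [PySem.List.pyGetD, hvp]
      simp only [hvj, hvp, hdj, hdp]
      have hpt : ∀ nb : List String,
          (decide (0 < PySem.List.pyGetD (pvPrefix nb pvCountU) (min ((nj : Nat) : Int) ((nb.length : Nat) : Int)) 0
                - PySem.List.pyGetD (pvPrefix nb pvCountU) (min ((ni : Nat) : Int) ((nb.length : Nat) : Int)) 0 ∧
              PySem.List.pyGetD (pvPrefix nb pvCountU) (min ((nj : Nat) : Int) ((nb.length : Nat) : Int)) 0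
                - PySem.List.pyGetD (pvPrefix nb pvCountU) (min ((ni : Nat) : Int) ((nb.length : Nat) : Int)) 0 <
              PySem.List.pyGetD (pvPrefix nb PySem.Str.len) (min ((nj : Nat) : Int) ((nb.length : Nat) : Int)) 0
                - PySem.List.pyGetD (pvPrefix nb PySem.Str.len) (min ((ni : Nat) : Int) ((nb.length : Nat) : Int)) 0))
          = decide ((PySem.Str.count (PySem.Str.join "" (PySem.List.slice nb (some ((ni : Nat) : Int)) (some ((nj : Nat) : Int)))) "_" : Int) ≠ 0 ∧
              (PySem.Str.count (PySem.Str.join "" (PySem.List.slice nb (some ((ni : Nat) : Int)) (some ((nj : Nat) : Int)))) "_" : Int) ≠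
                PySem.Str.len (PySem.Str.join "" (PySem.List.slice nb (some ((ni : Nat) : Int)) (some ((nj : Nat) : Int))))) := by
        intro nb
        rw [pvPrefixDeltaClamp pvCountU nb ni nj (le_of_lt hij),
          pvPrefixDeltaClamp PySem.Str.len nb ni nj (le_of_lt hij),
          ← pvCountJoin, ← pvLenJoin]
        have hle := pvCountLeLen (PySem.Str.join "" (PySem.List.slice nb (some ((ni : Nat) : Int)) (some ((nj : Nat) : Int))))
        have hge : (0 : Int) ≤ (PySem.Str.count (PySem.Str.join "" (PySem.List.slice nb (some ((ni : Nat) : Int)) (some ((nj : Nat) : Int)))) "_" : Int) := Int.natCast_nonneg _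
        apply decide_eq_decide.mpr
        constructor
        · rintro ⟨x, y⟩
          exact ⟨by omega, by omega⟩
        · rintro ⟨x, y⟩
          exact ⟨by omega, by omega⟩
      have hany :
          ((List.map (fun nb => (pvPrefix nb pvCountU, pvPrefix nb PySem.Str.len, ((nb.length : Nat) : Int))) neighbours).any
              fun t => decide
                (0 < PySem.List.pyGetD t.1 (min ((nj : Nat) : Int) t.2.2) 0 - PySem.List.pyGetD t.1 (min ((ni : Nat) : Int) t.2.2) 0 ∧
                  PySem.List.pyGetD t.1 (min ((nj : Nat) : Int) t.2.2) 0 - PySem.List.pyGetD t.1 (min ((ni : Nat) : Int) t.2.2) 0 <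
                    PySem.List.pyGetD t.2.1 (min ((nj : Nat) : Int) t.2.2) 0 - PySem.List.pyGetD t.2.1 (min ((ni : Nat) : Int) t.2.2) 0))
          = neighbours.any (fun nb =>
              decide ((PySem.Str.count (PySem.Str.join "" (PySem.List.slice nb (some ((ni : Nat) : Int)) (some ((nj : Nat) : Int)))) "_" : Int) ≠ 0 ∧
                (PySem.Str.count (PySem.Str.join "" (PySem.List.slice nb (some ((ni : Nat) : Int)) (some ((nj : Nat) : Int)))) "_" : Int) ≠
                  PySem.Str.len (PySem.Str.join "" (PySem.List.slice nb (some ((ni : Nat) : Int)) (some ((nj : Nat) : Int)))))) := by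
        rw [List.any_map]
        exact List.any_congr rfl (fun nb => hpt nb)
      by_cases hb1 : vj = "_"
      · by_cases hb2 : vp = "_"
        · rw [if_neg (show ¬(vj ≠ "_") by simp [hb1]), if_neg (show ¬(vp ≠ "_") by simp [hb2]),
            if_neg (show ¬(vj ≠ "_" ∨ vp ≠ "_") by simp [hb1, hb2]), hany]
          rw [pvNbScan, pvNbScan]
          cases horizontal <;> simp
        · rw [if_neg (show ¬(vj ≠ "_") by simp [hb1]), if_pos hb2, if_pos (Or.inr hb2)]
      · rw [if_pos hb1, if_pos (Or.inl hb1)]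
    · rw [if_neg h2, if_neg h2]

-- ===== VERDICT (by name: the statement is the Claim_ definition above) =====
theorem getPartWords_spec : Claim_equal_getPartWords := by
  intro seq k neighbours horizontal _
  unfold Spec_getPartWords
  exact pvMain seq k neighbours horizontal
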